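-- pv_equiv track=rewrite | github.com/paullintilhac/boolean_function_sensitivity | hardcoded_transformer.py | _choose_unique_reps
-- ===== SOURCE A (Python) =====
-- def _choose_unique_reps(combs, N):
--     used, reps = set(), []
--     for comp in combs:
--         chosen = None
--         for idx in comp:
--             if idx not in used:
--                 chosen = idx; break
--         if chosen is None:
--             for idx in range(N):
--                 if idx not in used:
--                     chosen = idx; break
--         used.add(chosen)
--         reps.append(chosen)
--     return reps
-- ===== SOURCE B (Python) =====
-- def _choose_unique_reps(combs, N):
--     # Recursive formulation building the result front-to-back with cons; tracks only used
--     # integers (the None case never affects later membership tests) plus a monotonic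
--     # fallback pointer so range(N) is never rescanned from 0.
--     def go(k, used, p):
--         if k == len(combs):
--             return []
--         for i in combs[k]:
--             if i not in used:
--                 return [i] + go(k + 1, used | {i}, p)
--         while p < N and p in used:
--             p += 1
--         if p < N:
--             return [p] + go(k + 1, used | {p}, p + 1)
--         return [None] + go(k + 1, used, p)
--     return go(0, set(), 0)
-- ===== Notes on version B (the rewrite author's own statement) =====
-- stated objective: alternative
-- what changed: B is a recursive formulation that builds the result with cons, tracks only used integers (never None, which cannot affect later membership tests) and replaces A's per-component rescan of range(N) by a monotonic fallback pointer that resumes where the previous scan stopped.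
import Mathlib
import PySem

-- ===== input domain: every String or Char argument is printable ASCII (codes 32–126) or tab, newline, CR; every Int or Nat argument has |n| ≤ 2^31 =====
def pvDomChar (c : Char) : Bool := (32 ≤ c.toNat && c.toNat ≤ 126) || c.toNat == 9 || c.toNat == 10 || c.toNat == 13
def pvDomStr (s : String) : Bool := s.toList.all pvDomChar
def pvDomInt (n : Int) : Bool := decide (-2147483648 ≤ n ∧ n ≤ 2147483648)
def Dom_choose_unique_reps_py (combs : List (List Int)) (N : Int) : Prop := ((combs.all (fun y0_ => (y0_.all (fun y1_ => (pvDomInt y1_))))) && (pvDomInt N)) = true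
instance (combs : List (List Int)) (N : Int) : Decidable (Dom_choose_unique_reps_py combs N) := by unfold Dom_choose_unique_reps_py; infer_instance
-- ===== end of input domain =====

-- B is a recursive formulation (cons-built result) that tracks only used integers — never the
-- None that A also stores, which cannot affect later membership tests — and replaces A's
-- per-component rescan of range(N) by a monotonic fallback pointer (alternative strategy).

-- ===== PORT A =====
-- A's inner 'for idx in comp: if idx not in used: chosen = idx; break' (used may contain None)
def pvAFirst (used : PySem.Set (Option Int)) : List Int → Option Int
  | [] => none
  | i :: rest => if PySem.Set.contains used (some i) then pvAFirst used rest else some i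

-- 'for idx in range(N): if idx not in used: chosen = idx; break'  (range is lazy: index loop)
def pvAFallback (used : PySem.Set (Option Int)) (idx N : Int) : Option Int :=
  if h : idx < N then
    (if PySem.Set.contains used (some idx) then pvAFallback used (idx + 1) N else some idx)
  else none
termination_by (N - idx).toNat
decreasing_by omega

def choose_unique_reps_py (combs : List (List Int)) (N : Int) : List (Option Int) :=
  (combs.foldl (fun (st : PySem.Set (Option Int) × List (Option Int)) comp =>
      let chosen :=
        match pvAFirst st.1 comp with
        | some c => some c
        | none => pvAFallback st.1 0 N
      (PySem.Set.add st.1 chosen, st.2 ++ [chosen]))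
    (PySem.Set.empty, [])).2

-- ===== PORT B =====
-- 'for i in combs[k]: if i not in used: …'  (used holds only ints)
def pvBFind (used : PySem.Set Int) : List Int → Option Int
  | [] => none
  | i :: rest => if PySem.Set.contains used i then pvBFind used rest else some i

-- 'while p < N and p in used: p += 1'
def pvBAdvance (used : PySem.Set Int) (p N : Int) : Int :=
  if h : p < N ∧ PySem.Set.contains used p = true then pvBAdvance used (p + 1) N else p
termination_by (N - p).toNat
decreasing_by omega

-- the inner recursive 'go' (structural recursion on the remaining components = index k)
def pvBGo (N : Int) : List (List Int) → PySem.Set Int → Int → List (Option Int)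
  | [], _, _ => []
  | comp :: rest, used, p =>
    match pvBFind used comp with
    | some i => some i :: pvBGo N rest (PySem.Set.add used i) p
    | none =>
      let p' := pvBAdvance used p N
      if p' < N then some p' :: pvBGo N rest (PySem.Set.add used p') (p' + 1)
      else none :: pvBGo N rest used p'

def choose_unique_reps_py_alt (combs : List (List Int)) (N : Int) : List (Option Int) :=
  pvBGo N combs PySem.Set.empty 0

-- ===== PRECONDITION & SPEC =====
def Spec_choose_unique_reps_py (combs : List (List Int)) (N : Int) (out : List (Option Int)) : Prop := out = choose_unique_reps_py_alt combs N
instance (combs : List (List Int)) (N : Int) (out : List (Option Int)) : Decidable (Spec_choose_unique_reps_py combs N out) := by unfold Spec_choose_unique_reps_py; infer_instance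

-- ===== CLAIM (what is proved, stated in full; the proofs are below) =====
def Claim_equal_choose_unique_reps_py : Prop := ∀ (combs : List (List Int)) (N : Int), Dom_choose_unique_reps_py combs N → Spec_choose_unique_reps_py combs N (choose_unique_reps_py combs N)

-- ===== LEMMAS AND PROOFS =====

-- uA (A's set of Option Int) and uB (B's set of Int) agree on integer membership
def pvRel (uA : PySem.Set (Option Int)) (uB : PySem.Set Int) : Prop :=
  ∀ i : Int, (some i ∈ uA ↔ i ∈ uB)

lemma pvRel_contains (uA : PySem.Set (Option Int)) (uB : PySem.Set Int) (h : pvRel uA uB)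
    (i : Int) : PySem.Set.contains uA (some i) = PySem.Set.contains uB i := by
  rw [Bool.eq_iff_iff, PySem.Set.contains_iff, PySem.Set.contains_iff]
  exact h i

lemma pvRel_add (uA : PySem.Set (Option Int)) (uB : PySem.Set Int) (h : pvRel uA uB) (c : Int) :
    pvRel (PySem.Set.add uA (some c)) (PySem.Set.add uB c) := by
  intro i
  rw [PySem.Set.mem_add, PySem.Set.mem_add]
  simp [h i]

lemma pvRel_add_none (uA : PySem.Set (Option Int)) (uB : PySem.Set Int) (h : pvRel uA uB) :
    pvRel (PySem.Set.add uA none) uB := by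
  intro i
  rw [PySem.Set.mem_add]
  simp [h i]

lemma pvFirst_eq_find (uA : PySem.Set (Option Int)) (uB : PySem.Set Int) (h : pvRel uA uB) :
    ∀ l : List Int, pvAFirst uA l = pvBFind uB l := by
  intro l
  induction l with
  | nil => rfl
  | cons i rest ih =>
    simp only [pvAFirst, pvBFind, ih]
    exact if_congr (by rw [PySem.Set.contains_iff, PySem.Set.contains_iff]; exact h i) rfl rfl

lemma pvBAdvance_ge (u : PySem.Set Int) (p N : Int) : p ≤ pvBAdvance u p N := by
  fun_induction pvBAdvance u p N with
  | case1 p h ih => omega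
  | case2 p h => omega

lemma pvBAdvance_mem (u : PySem.Set Int) (p N : Int) :
    ∀ j, p ≤ j → j < pvBAdvance u p N → PySem.Set.contains u j = true := by
  fun_induction pvBAdvance u p N with
  | case1 p h ih =>
    intro j hj1 hj2
    rcases eq_or_lt_of_le hj1 with rfl | hlt
    · exact h.2
    · exact ih j (by omega) hj2
  | case2 p h => intro j hj1 hj2; omega

lemma pvAFallback_skip (u : PySem.Set (Option Int)) (N : Int) :
    ∀ (n : Nat) (k p : Int), k ≤ p → p - k = n →
    (∀ j, k ≤ j → j < p → PySem.Set.contains u (some j) = true) →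
    pvAFallback u k N = pvAFallback u p N := by
  intro n
  induction n with
  | zero =>
    intro k p hkp hn _
    have hkp' : k = p := by omega
    subst hkp'
    rfl
  | succ m ih =>
    intro k p hkp hn hmem
    have hk : k < p := by omega
    by_cases hkN : k < N
    · rw [pvAFallback, dif_pos hkN, if_pos (hmem k le_rfl hk)]
      exact ih (k + 1) p (by omega) (by omega) (fun j h1 h2 => hmem j (by omega) h2)
    · rw [pvAFallback, dif_neg hkN, pvAFallback, dif_neg (by omega)]

lemma pvAFallback_eq_advance (uA : PySem.Set (Option Int)) (uB : PySem.Set Int)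
    (h : pvRel uA uB) (p N : Int) :
    pvAFallback uA p N =
      (if pvBAdvance uB p N < N then some (pvBAdvance uB p N) else none) := by
  fun_induction pvBAdvance uB p N with
  | case1 p hc ih =>
    rw [pvAFallback, dif_pos hc.1, if_pos ((pvRel_contains uA uB h p).trans hc.2)]
    exact ih
  | case2 p hc =>
    by_cases hpN : p < N
    · have hnc : ¬ PySem.Set.contains uA (some p) = true := by
        rw [pvRel_contains uA uB h p]; exact fun hx => hc ⟨hpN, hx⟩
      rw [pvAFallback, dif_pos hpN, if_neg hnc, if_pos hpN]
    · rw [pvAFallback, dif_neg hpN, if_neg hpN]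

lemma pvContains_addB (u : PySem.Set Int) (x y : Int)
    (h : PySem.Set.contains u y = true) : PySem.Set.contains (PySem.Set.add u x) y = true := by
  simp only [PySem.Set.contains_iff] at h ⊢
  rw [PySem.Set.mem_add]
  exact Or.inl h

lemma pvContains_addB_self (u : PySem.Set Int) (x : Int) :
    PySem.Set.contains (PySem.Set.add u x) x = true := by
  simp only [PySem.Set.contains_iff]
  rw [PySem.Set.mem_add]
  exact Or.inr rfl

lemma pvMain (N : Int) (combs : List (List Int)) :
    ∀ (uA : PySem.Set (Option Int)) (uB : PySem.Set Int) (acc : List (Option Int)) (p : Int),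
    0 ≤ p → pvRel uA uB →
    (∀ j : Int, 0 ≤ j → j < p → PySem.Set.contains uB j = true) →
    (combs.foldl (fun (st : PySem.Set (Option Int) × List (Option Int)) comp =>
        let chosen :=
          match pvAFirst st.1 comp with
          | some c => some c
          | none => pvAFallback st.1 0 N
        (PySem.Set.add st.1 chosen, st.2 ++ [chosen])) (uA, acc)).2 =
    acc ++ pvBGo N combs uB p := by
  induction combs with
  | nil => intro uA uB acc p _ _ _; simp [pvBGo]
  | cons comp rest ih =>
    intro uA uB acc p hp hrel hptr
    simp only [List.foldl_cons, pvBGo]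
    rw [pvFirst_eq_find uA uB hrel comp]
    cases hfc : pvBFind uB comp with
    | some c =>
      simp only
      rw [ih (PySem.Set.add uA (some c)) (PySem.Set.add uB c) (acc ++ [some c]) p hp
        (pvRel_add uA uB hrel c)
        (fun j h1 h2 => pvContains_addB uB c j (hptr j h1 h2))]
      simp
    | none =>
      have hrange : pvAFallback uA 0 N = pvAFallback uA p N :=
        pvAFallback_skip uA N (p - 0).toNat 0 p hp (by omega)
          (fun j h1 h2 => (pvRel_contains uA uB hrel j).trans (hptr j h1 h2))
      have hadv := pvAFallback_eq_advance uA uB hrel p N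
      have hge := pvBAdvance_ge uB p N
      have hmem := pvBAdvance_mem uB p N
      simp only [hrange, hadv]
      by_cases hlt : pvBAdvance uB p N < N
      · simp only [if_pos hlt]
        rw [ih (PySem.Set.add uA (some (pvBAdvance uB p N)))
          (PySem.Set.add uB (pvBAdvance uB p N)) _ (pvBAdvance uB p N + 1) (by omega)
          (pvRel_add uA uB hrel _) ?_]
        · simp
        · intro j h1 h2
          by_cases hj : j = pvBAdvance uB p N
          · rw [hj]; exact pvContains_addB_self uB (pvBAdvance uB p N)
          · refine pvContains_addB _ _ _ ?_
            by_cases hjp : j < p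
            · exact hptr j h1 hjp
            · exact hmem j (by omega) (by omega)
      · simp only [if_neg hlt]
        rw [ih (PySem.Set.add uA none) uB _ (pvBAdvance uB p N) (by omega)
          (pvRel_add_none uA uB hrel) ?_]
        · simp
        · intro j h1 h2
          by_cases hjp : j < p
          · exact hptr j h1 hjp
          · exact hmem j (by omega) h2

-- ===== VERDICT (by name: the statement is the Claim_ definition above) =====
theorem choose_unique_reps_py_spec : Claim_equal_choose_unique_reps_py := by
  intro combs N _
  unfold Spec_choose_unique_reps_py choose_unique_reps_py choose_unique_reps_py_alt
  rw [pvMain N combs PySem.Set.empty PySem.Set.empty [] 0 le_rfl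
    (by intro i; simp [PySem.Set.empty]) (by intro j h1 h2; omega)]
  simp
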